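-- pv_equiv track=rewrite | github.com/noiseorigin/PythonSelfLearning | p1.py | byteToASCII
-- ===== SOURCE A (Python) =====
-- def byteToASCII(bytes):
-- 	byteLength = len(bytes)
-- 	temp = 0
-- 	for i in range(byteLength):
-- 		if(bytes[i] == 'I'):
-- 			temp = temp + pow(2,byteLength-i-1)
-- 		i = i+1
-- 	return chr(temp)
-- ===== SOURCE B (Python) =====
-- def byteToASCII(bytes):
--     bits = ''.join('1' if b == 'I' else '0' for b in bytes)
--     return chr(int('0' + bits, 2))
-- ===== Notes on version B (the rewrite author's own statement) =====
-- stated objective: idiomatic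
-- what changed: B builds the binary digit string with a comprehension and ''.join and lets int(bits, 2) do the base-2 conversion, instead of A's indexed loop accumulating pow(2, len-i-1) terms.
import Mathlib
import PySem

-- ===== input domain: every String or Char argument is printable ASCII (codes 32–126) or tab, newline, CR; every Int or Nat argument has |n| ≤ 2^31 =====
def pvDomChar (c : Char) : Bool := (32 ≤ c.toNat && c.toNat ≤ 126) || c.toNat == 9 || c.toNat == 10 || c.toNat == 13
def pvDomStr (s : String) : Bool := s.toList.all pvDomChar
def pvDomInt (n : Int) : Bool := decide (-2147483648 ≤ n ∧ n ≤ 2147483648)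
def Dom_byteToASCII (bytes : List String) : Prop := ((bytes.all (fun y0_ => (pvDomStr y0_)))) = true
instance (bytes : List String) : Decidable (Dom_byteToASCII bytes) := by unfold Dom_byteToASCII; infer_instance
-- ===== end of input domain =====

-- B replaces A's indexed pow-accumulating loop by building the binary digit string and one
-- base-2 int() conversion (objective: idiomatic); same return value on all of Pre_.

-- ===== PORT A =====
def byteToASCII (bytes : List String) : String :=
  let byteLength : Int := bytes.length
  let temp : Int :=
    (PySem.List.pyRange 0 byteLength 1).foldl
      (fun temp i =>
        if PySem.List.pyGetD bytes i "" == "I" then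
          temp + 2 ^ (byteLength - i - 1).toNat   -- pow(2, byteLength-i-1); exponent ≥ 0 for i in range
        else temp) 0
  (Char.ofNat temp.toNat).toString                -- chr(temp); exact under Pre_ (see there)

-- ===== PORT B =====
def byteToASCII_alt (bytes : List String) : String :=
  let bits := PySem.Str.join "" (bytes.map (fun b => if b == "I" then "1" else "0"))
  -- int('0' + bits, 2), ported by hand step for step: exact on its argument, which is
  -- always a nonempty string of '0'/'1' digits (no sign/space/underscore/prefix cases arise)
  let v : Int := ("0" ++ bits).toList.foldl (fun a c => 2 * a + (if c == '1' then 1 else 0)) 0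
  (Char.ofNat v.toNat).toString                   -- chr(v); exact under Pre_

-- ===== PRECONDITION & SPEC =====
-- Pre_ excludes exactly the inputs where Python's chr raises ValueError (code point ≥ 0x110000:
-- an 'I' weighted 2^21 or more, or one weighted 2^20 together with one weighted 2^16..2^19) or
-- returns a lone surrogate 0xD800–0xDFFF (the top five binary digits of the code are 1,1,0,1,1),
-- which is not a value of the Lean String type; stated positionally over the reversed list
-- (position k from the right carries weight 2^k).
def Pre_byteToASCII (bytes : List String) : Prop :=
  (let r := bytes.reverse
   ((r.drop 21).all (fun s => s != "I")
    && (!(r.getD 20 "" == "I")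
        || (r.getD 19 "" != "I" && r.getD 18 "" != "I" && r.getD 17 "" != "I" && r.getD 16 "" != "I"))
    && !((r.drop 16).all (fun s => s != "I")
         && r.getD 15 "" == "I" && r.getD 14 "" == "I" && r.getD 13 "" != "I"
         && r.getD 12 "" == "I" && r.getD 11 "" == "I"))) = true
instance (bytes : List String) : Decidable (Pre_byteToASCII bytes) := by
  unfold Pre_byteToASCII; infer_instance

def pvWitness_byteToASCII : List String := ["I", "x", "I"]

def Spec_byteToASCII (bytes : List String) (out : String) : Prop := out = byteToASCII_alt bytes
instance (bytes : List String) (out : String) : Decidable (Spec_byteToASCII bytes out) := by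
  unfold Spec_byteToASCII; infer_instance

-- ===== CLAIM (what is proved, stated in full; the proofs are below) =====
def Claim_equal_byteToASCII : Prop :=
  ∀ (bytes : List String), Dom_byteToASCII bytes → Pre_byteToASCII bytes →
    Spec_byteToASCII bytes (byteToASCII bytes)

-- ===== LEMMAS AND PROOFS =====

/-- Horner value of the byte list, as computed (through chars) by B. -/
def pvHorner (bytes : List String) : Int :=
  bytes.foldl (fun a b => 2 * a + (if b == "I" then 1 else 0)) 0

theorem pvHorner_append (xs : List String) (x : String) :
    pvHorner (xs ++ [x]) = 2 * pvHorner xs + (if x == "I" then 1 else 0) := by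
  simp [pvHorner]

/-- A's positional-weight partial sums relate to B's Horner value of the prefix. -/
theorem pvA_partial (bytes : List String) (m : Nat) (hm : m ≤ bytes.length) :
    (List.range m).foldl
      (fun t k => if bytes.getD k "" == "I" then t + 2 ^ (bytes.length - 1 - k) else t) 0
      = pvHorner (bytes.take m) * 2 ^ (bytes.length - m) := by
  induction m with
  | zero => simp [pvHorner]
  | succ m ih =>
    have hm' : m ≤ bytes.length := Nat.le_of_succ_le hm
    have hlt : m < bytes.length := hm
    rw [List.range_succ, List.foldl_append, ih hm']
    have htake : bytes.take (m + 1) = bytes.take m ++ [bytes[m]] := by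
      rw [List.take_add_one]
      simp [List.getElem?_eq_getElem hlt]
    rw [htake, pvHorner_append]
    have hgetD : bytes.getD m "" = bytes[m] := List.getD_eq_getElem bytes "" hlt
    have hexp : bytes.length - m = (bytes.length - 1 - m) + 1 := by omega
    simp only [List.foldl_cons, List.foldl_nil, hgetD, hexp]
    have h2 : bytes.length - (m + 1) = bytes.length - 1 - m := by omega
    by_cases h : bytes[m] == "I" <;> simp [h, pow_succ, h2] <;> ring

/-- A's loop computes the Horner value. -/
theorem pvA_temp (bytes : List String) :
    (PySem.List.pyRange 0 (bytes.length : Int) 1).foldl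
      (fun temp i =>
        if PySem.List.pyGetD bytes i "" == "I" then
          temp + 2 ^ (((bytes.length : Int) - i - 1)).toNat
        else temp) 0 = pvHorner bytes := by
  rw [PySem.List.pyRange_one, List.foldl_map]
  have hsub : ((bytes.length : Int) - 0).toNat = bytes.length := by omega
  rw [hsub]
  rw [PySem.List.foldl_congr_mem (List.range bytes.length) _
      (fun t k => if bytes.getD k "" == "I" then t + 2 ^ (bytes.length - 1 - k) else t) 0
      ?_]
  · have := pvA_partial bytes bytes.length (le_refl _)
    simpa using this
  · intro t k hk
    have hk' : k < bytes.length := List.mem_range.mp hk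
    have h0 : ((0 : Int) + (k : Int)) = (k : Int) := by ring
    rw [h0, PySem.List.pyGetD_natCast]
    have he : (((bytes.length : Int) - (k : Int) - 1)).toNat = bytes.length - 1 - k := by omega
    rw [he]

/-- B's char fold over the joined bit string computes the Horner value too. -/
theorem pvB_val (bytes : List String) :
    ("0" ++ PySem.Str.join "" (bytes.map (fun b => if b == "I" then "1" else "0"))).toList.foldl
      (fun a c => 2 * a + (if c == '1' then 1 else 0)) 0 = pvHorner bytes := by
  have hjoin : (PySem.Str.join "" (bytes.map (fun b => if b == "I" then "1" else "0"))).toList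
      = bytes.map (fun b => if b == "I" then '1' else '0') := by
    rw [PySem.Str.toList_join]
    have hmap : (bytes.map (fun b => if b == "I" then "1" else "0")).map String.toList
        = (bytes.map (fun b => if b == "I" then '1' else '0')).map (fun c => [c]) := by
      simp only [List.map_map]
      apply List.map_congr_left
      intro b _
      by_cases h : b == "I" <;> simp_all
    simp only [hmap]
    exact PySem.Chars.join_nil_singletons _
  have happ : ("0" ++ PySem.Str.join "" (bytes.map (fun b => if b == "I" then "1" else "0"))).toList
      = '0' :: (PySem.Str.join "" (bytes.map (fun b => if b == "I" then "1" else "0"))).toList := by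
    simp
  rw [happ, hjoin, List.foldl_cons, List.foldl_map]
  simp only [pvHorner]
  apply PySem.List.foldl_congr_mem
  intro a b _
  by_cases h : b == "I" <;> simp_all

-- ===== VERDICT (by name: the statement is the Claim_ definition above) =====
theorem byteToASCII_spec : Claim_equal_byteToASCII := by
  intro bytes _ _
  unfold Spec_byteToASCII byteToASCII byteToASCII_alt
  simp only [pvA_temp, pvB_val]
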